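-- pv_equiv track=rewrite | github.com/st3phano/logica-matematica | challenge01.py | findLeftSideStartIndex
-- ===== SOURCE A (Python) =====
-- OPEN_PAREN = "("
--
-- CLOSE_PAREN = ")"
--
-- def findLeftSideStartIndex(formula: str, connectiveStartIndex: int) -> int:
--    startIndex = connectiveStartIndex - 1
--
--    # search for an opening parenthesis that has no matching closing parenthesis
--    openParenCount = 0
--    while ((startIndex > -1) and (openParenCount < 1)):
--       if (formula[startIndex] == OPEN_PAREN):
--          openParenCount += 1
--       elif (formula[startIndex] == CLOSE_PAREN):
--          openParenCount -= 1
--       startIndex -= 1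
--
--    startIndex += 1
--    if (openParenCount == 1):
--       startIndex += 1
--
--    return startIndex
-- ===== SOURCE B (Python) =====
-- OPEN_PAREN = "("
--
-- CLOSE_PAREN = ")"
--
-- def findLeftSideStartIndex(formula: str, connectiveStartIndex: int) -> int:
--     # forward scan with an explicit stack of '(' indices; the innermost
--     # unmatched '(' before connectiveStartIndex is the top of the stack
--     stack = []
--     for i in range(connectiveStartIndex):
--         if formula[i] == OPEN_PAREN:
--             stack.append(i)
--         elif formula[i] == CLOSE_PAREN and stack:
--             stack.pop()
--     return stack[-1] + 1 if stack else 0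
-- ===== Notes on version B (the rewrite author's own statement) =====
-- stated objective: idiomatic
-- what changed: Replaced the backward while-loop with a balance counter by a single forward scan over range(connectiveStartIndex) keeping an explicit stack of unmatched '(' indices; the answer is top-of-stack + 1 or 0.
-- outside the precondition, e.g. on findLeftSideStartIndex('ab', -1): A returns -1, B returns 0; on findLeftSideStartIndex('', -2): A returns -2, B returns 0
import Mathlib
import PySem

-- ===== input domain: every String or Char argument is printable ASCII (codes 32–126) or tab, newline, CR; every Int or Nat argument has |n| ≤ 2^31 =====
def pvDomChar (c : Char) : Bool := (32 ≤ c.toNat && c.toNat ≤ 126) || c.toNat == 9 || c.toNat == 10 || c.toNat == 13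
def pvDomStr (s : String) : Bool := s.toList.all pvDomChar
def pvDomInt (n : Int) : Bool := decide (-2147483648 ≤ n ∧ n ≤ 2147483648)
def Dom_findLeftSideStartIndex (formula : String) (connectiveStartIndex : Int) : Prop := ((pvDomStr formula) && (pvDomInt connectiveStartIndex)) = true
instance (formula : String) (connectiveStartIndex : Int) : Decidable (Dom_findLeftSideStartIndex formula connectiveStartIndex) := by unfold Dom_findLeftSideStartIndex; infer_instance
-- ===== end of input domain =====

-- B replaces A's backward balance-counter loop by a forward scan with an explicit
-- stack of unmatched '(' indices (idiomatic; same O(n) cost).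

-- ===== PORT A =====
-- the backward while-loop of A: state (startIndex, openParenCount)
def pvLoopA (cs : List Char) (startIndex : Int) (count : Int) : Int × Int :=
  if _h : startIndex > -1 ∧ count < 1 then
    match PySem.List.pyGet? cs startIndex with
    | none => (startIndex, count)  -- IndexError in Python; excluded by Pre_
    | some c =>
      pvLoopA cs (startIndex - 1)
        (if c = '(' then count + 1 else if c = ')' then count - 1 else count)
  else (startIndex, count)
termination_by (startIndex + 1).toNat
decreasing_by omega

def findLeftSideStartIndex (formula : String) (connectiveStartIndex : Int) : Int :=
  let r := pvLoopA formula.toList (connectiveStartIndex - 1) 0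
  let s := r.1 + 1
  if r.2 = 1 then s + 1 else s

-- ===== PORT B =====
-- one step of B's forward scan: push '(' index, pop on ')' (pop of empty = ignore)
def pvStepB (cs : List Char) (stack : List Int) (i : Int) : List Int :=
  match PySem.List.pyGet? cs i with
  | none => stack  -- IndexError in Python; excluded by Pre_
  | some c =>
    if c = '(' then i :: stack
    else if c = ')' then stack.tail
    else stack

def findLeftSideStartIndex_alt (formula : String) (connectiveStartIndex : Int) : Int :=
  match (PySem.List.pyRange 0 connectiveStartIndex 1).foldl (pvStepB formula.toList) [] with
  | t :: _ => t + 1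
  | [] => 0

-- ===== PRECONDITION & SPEC =====
-- Pre_ excludes connectiveStartIndex > len(formula), where A raises IndexError, and
-- negative connectiveStartIndex, not an index into the formula, on which A returns the
-- negative connectiveStartIndex itself (leftover loop-initialisation state) while B
-- returns 0.
def Pre_findLeftSideStartIndex (formula : String) (connectiveStartIndex : Int) : Prop :=
  0 ≤ connectiveStartIndex ∧ connectiveStartIndex ≤ (formula.toList.length : Int)
instance (formula : String) (connectiveStartIndex : Int) : Decidable (Pre_findLeftSideStartIndex formula connectiveStartIndex) := by unfold Pre_findLeftSideStartIndex; infer_instance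

def pvWitness_findLeftSideStartIndex : String × Int := ("(p", 2)

def Spec_findLeftSideStartIndex (formula : String) (connectiveStartIndex : Int) (out : Int) : Prop := out = findLeftSideStartIndex_alt formula connectiveStartIndex
instance (formula : String) (connectiveStartIndex : Int) (out : Int) : Decidable (Spec_findLeftSideStartIndex formula connectiveStartIndex out) := by unfold Spec_findLeftSideStartIndex; infer_instance

-- ===== CLAIM (what is proved, stated in full; the proofs are below) =====
def Claim_equal_findLeftSideStartIndex : Prop := ∀ (formula : String) (connectiveStartIndex : Int), Dom_findLeftSideStartIndex formula connectiveStartIndex → Pre_findLeftSideStartIndex formula connectiveStartIndex → Spec_findLeftSideStartIndex formula connectiveStartIndex (findLeftSideStartIndex formula connectiveStartIndex)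

-- ===== LEMMAS AND PROOFS =====

-- proof-side model of B's stack after scanning the prefix of length n
def pvF (cs : List Char) : Nat → List Int
  | 0 => []
  | n+1 =>
    let st := pvF cs n
    match cs[n]? with
    | none => st
    | some c => if c = '(' then (n : Int) :: st else if c = ')' then st.tail else st

theorem pvB_foldl_eq_pvF (cs : List Char) (n : Nat) (hn : n ≤ cs.length) :
    (PySem.List.pyRange 0 (n : Int) 1).foldl (pvStepB cs) [] = pvF cs n := by
  induction n with
  | zero => simp [pvF]
  | succ n ih =>
    have h1 : ((n : Int) + 1) = ((n + 1 : Nat) : Int) := by push_cast; ring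
    have h2 : PySem.List.pyRange 0 ((n + 1 : Nat) : Int) 1
        = PySem.List.pyRange 0 (n : Int) 1 ++ [(n : Int)] := by
      rw [← h1, PySem.List.pyRange_one_succ_right (by positivity)]
    rw [h2, List.foldl_append, ih (by omega)]
    simp only [List.foldl_cons, List.foldl_nil, pvF, pvStepB, PySem.List.pyGet?_natCast]

-- A's backward loop characterised by the forward stack: started at index n-1 with
-- count -k it stops just before the k-th unmatched '(' (counting from the right),
-- or reaches -1 with a non-positive count.
theorem pvA_loop_char (cs : List Char) (n : Nat) (hn : n ≤ cs.length) (k : Nat) :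
    (∀ t, (pvF cs n)[k]? = some t → pvLoopA cs ((n : Int) - 1) (-(k : Int)) = (t - 1, 1)) ∧
    ((pvF cs n)[k]? = none → ∃ c ≤ 0, pvLoopA cs ((n : Int) - 1) (-(k : Int)) = (-1, c)) := by
  induction n generalizing k with
  | zero =>
    refine ⟨fun t ht => by simp [pvF] at ht, fun _ => ⟨-(k : Int), by omega, ?_⟩⟩
    rw [pvLoopA, dif_neg (by omega)]
    norm_num
  | succ n ih =>
    have hlt : n < cs.length := by omega
    have hget : PySem.List.pyGet? cs ((n : Nat) : Int) = some cs[n] :=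
      PySem.List.pyGet?_ofNat cs n hlt
    have hcast : ((n + 1 : Nat) : Int) - 1 = ((n : Nat) : Int) := by push_cast; ring
    have hstep : ∀ c : Int, c < 1 → pvLoopA cs (((n + 1 : Nat) : Int) - 1) c
        = pvLoopA cs ((n : Int) - 1)
            (if cs[n] = '(' then c + 1 else if cs[n] = ')' then c - 1 else c) := by
      intro c hc
      rw [pvLoopA, dif_pos ⟨by omega, hc⟩, hcast, hget]
    have hFs : pvF cs (n + 1)
        = (if cs[n] = '(' then (n : Int) :: pvF cs n
           else if cs[n] = ')' then (pvF cs n).tail else pvF cs n) := by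
      simp [pvF, List.getElem?_eq_getElem hlt]
    by_cases hop : cs[n] = '('
    · -- '(' : count + 1, push n
      have hFs' : pvF cs (n + 1) = (n : Int) :: pvF cs n := by rw [hFs]; simp [hop]
      cases k with
      | zero =>
        constructor
        · intro t ht
          rw [hFs'] at ht
          simp at ht
          have h1 : -((0 : Nat) : Int) + 1 = 1 := by norm_num
          rw [hstep (-((0 : Nat) : Int)) (by norm_num), if_pos hop, h1, pvLoopA,
            dif_neg (by omega), ← ht]
        · intro h; rw [hFs'] at h; simp at h
      | succ j =>
        have hL : pvLoopA cs (((n + 1 : Nat) : Int) - 1) (-((j + 1 : Nat) : Int))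
            = pvLoopA cs ((n : Int) - 1) (-(j : Int)) := by
          rw [hstep _ (by omega), if_pos hop]
          congr 1
          push_cast; ring
        have hidx : (pvF cs (n + 1))[j + 1]? = (pvF cs n)[j]? := by rw [hFs']; simp
        exact ⟨fun t ht => by rw [hL]; exact (ih (by omega) j).1 t (hidx ▸ ht),
               fun h => by rw [hL]; exact (ih (by omega) j).2 (hidx ▸ h)⟩
    · by_cases hcl : cs[n] = ')'
      · -- ')' : count - 1, pop (tail)
        have hFs' : pvF cs (n + 1) = (pvF cs n).tail := by rw [hFs]; simp [hcl]
        have hL : pvLoopA cs (((n + 1 : Nat) : Int) - 1) (-(k : Int))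
            = pvLoopA cs ((n : Int) - 1) (-((k + 1 : Nat) : Int)) := by
          rw [hstep _ (by omega), if_neg hop, if_pos hcl]
          congr 1
          push_cast; ring
        have hidx : (pvF cs (n + 1))[k]? = (pvF cs n)[k + 1]? := by
          rw [hFs', List.getElem?_tail]
        exact ⟨fun t ht => by rw [hL]; exact (ih (by omega) (k + 1)).1 t (hidx ▸ ht),
               fun h => by rw [hL]; exact (ih (by omega) (k + 1)).2 (hidx ▸ h)⟩
      · -- other char: nothing changes
        have hFs' : pvF cs (n + 1) = pvF cs n := by rw [hFs]; simp [hop, hcl]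
        have hL : pvLoopA cs (((n + 1 : Nat) : Int) - 1) (-(k : Int))
            = pvLoopA cs ((n : Int) - 1) (-(k : Int)) := by
          rw [hstep _ (by omega), if_neg hop, if_neg hcl]
        exact ⟨fun t ht => by rw [hL]; exact (ih (by omega) k).1 t (hFs' ▸ ht),
               fun h => by rw [hL]; exact (ih (by omega) k).2 (hFs' ▸ h)⟩

-- ===== VERDICT (by name: the statement is the Claim_ definition above) =====
theorem findLeftSideStartIndex_spec : Claim_equal_findLeftSideStartIndex := by
  intro formula csi _hdom hpre
  unfold Pre_findLeftSideStartIndex at hpre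
  set cs := formula.toList with hcs
  obtain ⟨n, rfl⟩ : ∃ n : Nat, csi = (n : Int) := ⟨csi.toNat, by omega⟩
  have hnle : n ≤ cs.length := by omega
  have hB : findLeftSideStartIndex_alt formula (n : Int)
      = (match pvF cs n with | t :: _ => t + 1 | [] => 0) := by
    unfold findLeftSideStartIndex_alt
    rw [pvB_foldl_eq_pvF cs n hnle]
  have hA := pvA_loop_char cs n hnle 0
  have hz : -((0 : Nat) : Int) = 0 := by norm_num
  rw [hz] at hA
  unfold Spec_findLeftSideStartIndex findLeftSideStartIndex
  rw [← hcs]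
  cases hF : pvF cs n with
  | nil =>
    obtain ⟨c, hc, hrun⟩ := hA.2 (by rw [hF]; rfl)
    have hne : ¬(c = 1) := by omega
    rw [hB, hF]
    simp [hrun, hne]
  | cons t rest =>
    have hrun := hA.1 t (by rw [hF]; rfl)
    rw [hB, hF]
    simp [hrun]
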